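-- pv_equiv track=rewrite | github.com/konszymanski/leetcode-dataset | obfuscated_solutions/python/1371-find-the-longest-substring-containing-vowels-in-even-counts/solution_1_universal_wrap.py | findTheLongestSubstring
-- ===== SOURCE A (Python) =====
-- def findTheLongestSubstring(s: str) ->int:
--     if True:
--         prefixXOR = 0
--     characterMap = [0] * 26
--     characterMap[ord('a') - ord('a')] = 1
--     characterMap[ord('e') - ord('a')] = 2
--     if True:
--         characterMap[ord('i') - ord('a')] = 4
--     if True:
--         characterMap[ord('o') - ord('a')] = 8
--     if True:
--         characterMap[ord('u') - ord('a')] = 16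
--     mp = [-1] * 32
--     longestSubstring = 0
--     if True:
--         for i in range(len(s)):
--             prefixXOR ^= characterMap[ord(s[i]) - ord('a')]
--             if mp[prefixXOR] == -1 and prefixXOR != 0:
--                 mp[prefixXOR] = i
--             longestSubstring = max(longestSubstring, i - mp[prefixXOR])
--     if True:
--         return longestSubstring
-- ===== SOURCE B (Python) =====
-- def findTheLongestSubstring(s: str) -> int:
--     pref = [0]
--     for c in s:
--         if c == 'a':
--             b = 1
--         elif c == 'e':
--             b = 2
--         elif c == 'i':
--             b = 4
--         elif c == 'o':
--             b = 8
--         elif c == 'u':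
--             b = 16
--         else:
--             b = 0
--         pref.append(pref[-1] ^ b)
--     first = [-1] * 32
--     last = [-1] * 32
--     for t in range(len(pref) - 1, -1, -1):
--         first[pref[t]] = t
--     for t in range(len(pref)):
--         last[pref[t]] = t
--     return max(last[m] - first[m] for m in range(32) if first[m] >= 0)
-- ===== Notes on version B (the rewrite author's own statement) =====
-- stated objective: alternative
-- what changed: Replaced A's fused single pass (online first-occurrence table updated inside the scan plus a running maximum) by three separate passes: materialise the prefix vowel-parity list, fill per-mask first- and last-occurrence tables by plain index overwrites (backward and forward), and return the maximum of last-first over the 32 masks.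
-- outside the precondition, e.g. on findTheLongestSubstring('G'): A returns 0, B returns 1; on findTheLongestSubstring('K'): A returns 0, B returns 1; on findTheLongestSubstring('O'): A returns 0, B returns 1
import Mathlib
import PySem

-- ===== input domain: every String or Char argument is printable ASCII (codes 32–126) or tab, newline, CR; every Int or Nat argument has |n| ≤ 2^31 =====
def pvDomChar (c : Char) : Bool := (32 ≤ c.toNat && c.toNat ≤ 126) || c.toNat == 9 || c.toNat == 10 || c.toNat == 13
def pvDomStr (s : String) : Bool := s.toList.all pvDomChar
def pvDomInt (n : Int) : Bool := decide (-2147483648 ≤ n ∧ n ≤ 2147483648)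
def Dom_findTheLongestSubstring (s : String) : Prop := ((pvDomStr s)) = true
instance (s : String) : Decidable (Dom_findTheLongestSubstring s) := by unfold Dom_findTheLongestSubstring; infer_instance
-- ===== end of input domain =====

-- B replaces A's fused single pass (online first-occurrence table + running maximum) by three
-- simple passes: materialise the prefix-parity list, fill per-mask first/last-occurrence tables by
-- index overwrites, and take the max of last-first over the 32 masks (a different decomposition
-- of the same O(n) task; the per-index work is a plain store instead of a conditional update).

-- ===== PORT A =====
-- characterMap: [0]*26 with the five vowel bits assigned (the Python assignment chain)
def pvCharMap : List Int :=
  (((((List.replicate 26 (0 : Int)).set 0 1).set 4 2).set 8 4).set 14 8).set 20 16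

-- loop body of 'for i in range(len(s))'; state (prefixXOR, mp, longestSubstring).
-- characterMap[ord(s[i]) - 97] is PySem.List.pyGet? (Python negative-index semantics); the reads
-- l.getD i and mp.getD prefixXOR are in range whenever the loop runs (i < len(s), prefixXOR < 32).
def pvStepA (l : List Char) (st : Nat × List Int × Int) (i : Nat) : Nat × List Int × Int :=
  let px := st.1 ^^^ ((PySem.List.pyGet? pvCharMap (((l.getD i ' ').toNat : Int) - 97)).getD 0).toNat
  let mp := if st.2.1.getD px 0 = -1 ∧ px ≠ 0 then st.2.1.set px (i : Int) else st.2.1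
  (px, mp, max st.2.2 ((i : Int) - mp.getD px 0))

def findTheLongestSubstring (s : String) : Int :=
  ((List.range s.toList.length).foldl (pvStepA s.toList) (0, List.replicate 32 (-1 : Int), 0)).2.2

-- ===== PORT B =====
def pvVbit (c : Char) : Nat :=
  if c = 'a' then 1 else if c = 'e' then 2 else if c = 'i' then 4
  else if c = 'o' then 8 else if c = 'u' then 16 else 0

-- 'pref.append(pref[-1] ^ b)'; pref[-1] is PySem.List.pyGetD _ (-1) _
def pvPrefList (l : List Char) : List Nat :=
  l.foldl (fun pref c => pref ++ [PySem.List.pyGetD pref (-1) 0 ^^^ pvVbit c]) [0]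

-- 'for t in range(len(pref)-1, -1, -1): first[pref[t]] = t'; pref[t] < 32 and t in range always
def pvFillDown (pref : List Nat) : List Int :=
  (List.range pref.length).reverse.foldl
    (fun arr t => arr.set (pref.getD t 0) (t : Int)) (List.replicate 32 (-1 : Int))

-- 'for t in range(len(pref)): last[pref[t]] = t'
def pvFillUp (pref : List Nat) : List Int :=
  (List.range pref.length).foldl
    (fun arr t => arr.set (pref.getD t 0) (t : Int)) (List.replicate 32 (-1 : Int))

-- Python's max(...) would raise on an empty sequence; the candidate list is provably nonempty
-- (the mask pref[0] = 0 always occurs), so the '.getD 0' default is never taken.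
def findTheLongestSubstring_alt (s : String) : Int :=
  let pref := pvPrefList s.toList
  let first := pvFillDown pref
  let last := pvFillUp pref
  (PySem.List.max? ((List.range 32).filterMap
      (fun m => if 0 ≤ first.getD m 0 then some (last.getD m 0 - first.getD m 0) else none))
    (fun x => x)).getD 0

-- ===== PRECONDITION & SPEC =====
-- Pre_ excludes (i) strings with a character outside 'G'..'z' (codes 71..122): there A's table
-- lookup ord(c)-97 is out of range and raises IndexError; and (ii) strings containing one of
-- 'G','K','O','U','[': A's 26-entry table reads those at a wrapped-around negative index and so
-- counts them as the vowels a,e,i,o,u, while B counts every non-vowel as a consonant — both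
-- values are artefacts of input outside the problem's lowercase domain (see claim.json cites).
def Pre_findTheLongestSubstring (s : String) : Prop :=
  (s.toList.all (fun c =>
    (71 ≤ c.toNat && c.toNat ≤ 122) && !(c ∈ (['G', 'K', 'O', 'U', '['] : List Char)))) = true
instance (s : String) : Decidable (Pre_findTheLongestSubstring s) := by
  unfold Pre_findTheLongestSubstring; infer_instance
def pvWitness_findTheLongestSubstring : String := "leetcode"

def Spec_findTheLongestSubstring (s : String) (out : Int) : Prop :=
  out = findTheLongestSubstring_alt s
instance (s : String) (out : Int) : Decidable (Spec_findTheLongestSubstring s out) := by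
  unfold Spec_findTheLongestSubstring; infer_instance

-- ===== CLAIM =====
def Claim_equal_findTheLongestSubstring : Prop :=
  ∀ (s : String), Dom_findTheLongestSubstring s → Pre_findTheLongestSubstring s →
    Spec_findTheLongestSubstring s (findTheLongestSubstring s)

-- ===== LEMMAS AND PROOFS =====

-- vowel-parity mask of the first k characters, for a per-character bit function f
def pvPfx (f : Char → Nat) (l : List Char) (k : Nat) : Nat :=
  (l.take k).foldl (fun a c => a ^^^ f c) 0

-- A's per-character bit (table lookup with Python indexing)
def pvAbit (c : Char) : Nat :=
  ((PySem.List.pyGet? pvCharMap ((c.toNat : Int) - 97)).getD 0).toNat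

-- first t ≤ i with pvPfx f l t = x
def pvFo (f : Char → Nat) (l : List Char) (x i : Nat) : Option Nat :=
  (List.range (i + 1)).find? (fun t => pvPfx f l t == x)

def pvFoD (f : Char → Nat) (l : List Char) (x i : Nat) : Int :=
  match pvFo f l x i with | some t => (t : Int) - 1 | none => -1

theorem pvPfx_zero (f : Char → Nat) (l : List Char) : pvPfx f l 0 = 0 := rfl

theorem pvPfx_succ (f : Char → Nat) (l : List Char) (k : Nat) (h : k < l.length) :
    pvPfx f l (k + 1) = pvPfx f l k ^^^ f (l.getD k ' ') := by
  unfold pvPfx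
  rw [List.take_succ_eq_append_getElem h, List.foldl_append]
  simp [List.getD, List.getElem?_eq_getElem h]

theorem pvXor_lt {a b : Nat} (ha : a < 32) (hb : b < 32) : a ^^^ b < 32 := by
  have := Nat.xor_lt_two_pow (n := 5) ha hb
  simpa using this

theorem pvAbit_lt (c : Char) : pvAbit c < 32 := by
  unfold pvAbit
  cases h : PySem.List.pyGet? pvCharMap ((c.toNat : Int) - 97) with
  | none => simp
  | some v =>
      have hv : v ∈ pvCharMap := PySem.List.mem_of_pyGet?_eq_some _ h
      have : ∀ x ∈ pvCharMap, x.toNat < 32 := by decide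
      simpa using this v hv

theorem pvFo_succ (f : Char → Nat) (l : List Char) (x i : Nat) :
    pvFo f l x (i + 1) =
      (pvFo f l x i).or (if pvPfx f l (i + 1) = x then some (i + 1) else none) := by
  unfold pvFo
  rw [List.range_succ, List.find?_append]
  congr 1
  by_cases h : pvPfx f l (i + 1) = x <;> simp [List.find?_cons, h]

theorem pvFo_none (f : Char → Nat) (l : List Char) (x i : Nat) (h : pvFo f l x i = none) :
    ∀ t, t ≤ i → pvPfx f l t ≠ x := by
  induction i with
  | zero =>
      intro t ht
      interval_cases t
      unfold pvFo at h
      simp [List.range_one, List.find?] at h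
      simpa using h
  | succ i ih =>
      rw [pvFo_succ] at h
      rcases Option.or_eq_none_iff.mp h with ⟨h1, h2⟩
      intro t ht
      rcases Nat.lt_or_ge t (i + 1) with h' | h'
      · exact ih h1 t (Nat.lt_succ_iff.mp h')
      · have : t = i + 1 := le_antisymm ht h'
        subst this
        intro hc
        simp [hc] at h2

theorem pvFo_some (f : Char → Nat) (l : List Char) (x i t : Nat) (h : pvFo f l x i = some t) :
    t ≤ i ∧ pvPfx f l t = x ∧ ∀ u, u ≤ i → pvPfx f l u = x → t ≤ u := by
  induction i generalizing t with
  | zero =>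
      unfold pvFo at h
      simp [List.range_one, List.find?] at h
      by_cases h0 : pvPfx f l 0 = x
      · simp [h0] at h
        exact ⟨by omega, by rw [← h]; exact h0, fun u _ _ => by omega⟩
      · simp [h0] at h
  | succ i ih =>
      rw [pvFo_succ] at h
      cases hfo : pvFo f l x i with
      | none =>
          rw [hfo] at h
          simp at h
          by_cases hx : pvPfx f l (i + 1) = x
          · simp [hx] at h
            subst h
            refine ⟨le_refl _, hx, ?_⟩
            intro u hu hux
            rcases Nat.lt_or_ge u (i + 1) with h' | h'
            · exact absurd hux (pvFo_none f l x i hfo u (Nat.lt_succ_iff.mp h'))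
            · exact h'
          · simp [hx] at h
      | some t' =>
          rw [hfo] at h
          obtain rfl : t' = t := by simpa using h
          obtain ⟨h1, h2, h3⟩ := ih t' hfo
          refine ⟨Nat.le_succ_of_le h1, h2, ?_⟩
          intro u hu hux
          rcases Nat.lt_or_ge u (i + 1) with h' | h'
          · exact h3 u (by omega) hux
          · omega

theorem pvFo_exists (f : Char → Nat) (l : List Char) (x i k : Nat)
    (hk : k ≤ i) (hx : pvPfx f l k = x) : ∃ t, pvFo f l x i = some t := by
  cases h : pvFo f l x i with
  | none => exact absurd hx (pvFo_none f l x i h k hk)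
  | some t => exact ⟨t, rfl⟩

-- the invariant carried by A's loop state (prefixXOR, mp, longestSubstring)
def pvInvA (l : List Char) (i : Nat) (st : Nat × List Int × Int) : Prop :=
  st.1 = pvPfx pvAbit l i ∧ st.1 < 32 ∧ st.2.1.length = 32 ∧
  (∀ x, x < 32 → st.2.1.getD x 0 = pvFoD pvAbit l x i) ∧
  0 ≤ st.2.2 ∧
  (∀ t k, t ≤ k → k ≤ i → pvPfx pvAbit l t = pvPfx pvAbit l k → (k : Int) - t ≤ st.2.2) ∧
  (st.2.2 = 0 ∨ ∃ t k, t ≤ k ∧ k ≤ i ∧ pvPfx pvAbit l t = pvPfx pvAbit l k ∧ st.2.2 = (k : Int) - t)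

theorem pvStepA_inv (l : List Char) (i : Nat) (st : Nat × List Int × Int)
    (hi : i < l.length) (h : pvInvA l i st) : pvInvA l (i + 1) (pvStepA l st i) := by
  obtain ⟨px, mp, long⟩ := st
  obtain ⟨hpx, hpx32, hlen, hmp, hlong0, hLB, hACH⟩ := h
  simp only at hpx hpx32 hlen hmp hlong0 hLB hACH
  have hv32 : pvAbit (l.getD i ' ') < 32 := pvAbit_lt _
  set px' := px ^^^ pvAbit (l.getD i ' ') with hpx'def
  have hpfx1 : px' = pvPfx pvAbit l (i + 1) := by
    rw [pvPfx_succ _ _ _ hi, ← hpx]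
  have hpx'32 : px' < 32 := pvXor_lt hpx32 hv32
  set mpNew := if mp.getD px' 0 = -1 ∧ px' ≠ 0 then mp.set px' (i : Int) else mp with hmpNewdef
  have hstep : pvStepA l (px, mp, long) i = (px', mpNew, max long ((i : Int) - mpNew.getD px' 0)) := rfl
  rw [hstep]
  -- first occurrence of px' among prefixes 0..i+1 exists
  obtain ⟨t0, ht0⟩ : ∃ t0, pvFo pvAbit l px' (i + 1) = some t0 :=
    pvFo_exists pvAbit l px' (i + 1) (i + 1) (le_refl _) hpfx1.symm
  obtain ⟨ht0le, ht0pfx, ht0min⟩ := pvFo_some pvAbit l px' (i + 1) t0 ht0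
  have hlenNew : mpNew.length = 32 := by
    rw [hmpNewdef]; split_ifs <;> simp [hlen]
  -- the updated table entry at px'
  have hmpNewpx : mpNew.getD px' 0 = (t0 : Int) - 1 := by
    cases hcase : pvFo pvAbit l px' i with
    | none =>
        have hne0 : px' ≠ 0 := by
          intro h0
          exact pvFo_none pvAbit l px' i hcase 0 (Nat.zero_le _) (by rw [pvPfx_zero, h0])
        have hcur : mp.getD px' 0 = -1 := by
          rw [hmp px' hpx'32]; unfold pvFoD; rw [hcase]
        have hset : mpNew = mp.set px' (i : Int) := by
          rw [hmpNewdef, if_pos ⟨hcur, hne0⟩]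
        have hfo1 : pvFo pvAbit l px' (i + 1) = some (i + 1) := by
          rw [pvFo_succ, hcase, if_pos hpfx1.symm]; rfl
        have ht0eq : t0 = i + 1 := by
          rw [ht0] at hfo1; exact Option.some.inj hfo1
        rw [hset, ht0eq]
        have hx : px' < mp.length := by omega
        simp [List.getD, List.getElem?_set_self, hx]
    | some t =>
        have hfo1 : pvFo pvAbit l px' (i + 1) = some t := by
          rw [pvFo_succ, hcase]; rfl
        have ht0eq : t0 = t := by rw [ht0] at hfo1; exact Option.some.inj hfo1
        obtain ⟨htle, htpfx, -⟩ := pvFo_some pvAbit l px' i t hcase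
        have hval : pvFoD pvAbit l px' i = (t : Int) - 1 := by
          unfold pvFoD; rw [hcase]
        have hcond : ¬ (mp.getD px' 0 = -1 ∧ px' ≠ 0) := by
          rw [hmp px' hpx'32, hval]
          rintro ⟨heq, hne⟩
          have ht00 : t = 0 := by omega
          subst ht00
          exact hne (by rw [← htpfx, pvPfx_zero])
        rw [hmpNewdef, if_neg hcond, hmp px' hpx'32]
        unfold pvFoD; rw [hcase, ht0eq]
  refine ⟨hpfx1, hpx'32, hlenNew, ?_, ?_, ?_, ?_⟩
  · -- table spec at i+1
    intro x hx
    by_cases hxe : x = px'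
    · subst hxe
      show mpNew.getD px' 0 = pvFoD pvAbit l px' (i + 1)
      rw [hmpNewpx]; unfold pvFoD; rw [ht0]
    · have hfo : pvFo pvAbit l x (i + 1) = pvFo pvAbit l x i := by
        rw [pvFo_succ, if_neg (fun hh => hxe (by rw [← hh, hpfx1]))]
        cases pvFo pvAbit l x i <;> rfl
      have hget : mpNew.getD x 0 = mp.getD x 0 := by
        rw [hmpNewdef]
        split_ifs with hcond
        · simp [List.getD, List.getElem?_set_ne (fun hh => hxe hh.symm)]
        · rfl
      show mpNew.getD x 0 = pvFoD pvAbit l x (i + 1)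
      rw [hget, hmp x hx]; unfold pvFoD; rw [hfo]
  · exact le_trans hlong0 (le_max_left _ _)
  · -- lower bound over all pairs up to i+1
    intro t k htk hk hp
    rcases Nat.lt_or_ge k (i + 1) with h' | h'
    · exact le_trans (hLB t k htk (by omega) hp) (le_max_left _ _)
    · have hke : k = i + 1 := by omega
      subst hke
      have ht0t : t0 ≤ t := ht0min t htk (by rw [hp, ← hpfx1])
      exact le_trans (by rw [hmpNewpx]; push_cast; omega) (le_max_right _ _)
  · -- achievability
    rcases max_choice long ((i : Int) - mpNew.getD px' 0) with hmx | hmx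
    · rw [hmx]
      rcases hACH with h | ⟨t, k, ha, hb, hc, hd⟩
      · exact Or.inl h
      · exact Or.inr ⟨t, k, ha, by omega, hc, hd⟩
    · rw [hmx, hmpNewpx]
      refine Or.inr ⟨t0, i + 1, ht0le, le_refl _, by rw [ht0pfx, hpfx1], by push_cast; ring⟩

def pvRunA (l : List Char) (n : Nat) : Nat × List Int × Int :=
  (List.range n).foldl (pvStepA l) (0, List.replicate 32 (-1 : Int), 0)

theorem pvRunA_inv (l : List Char) : ∀ n, n ≤ l.length → pvInvA l n (pvRunA l n) := by
  intro n
  induction n with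
  | zero =>
      intro _
      have h0 : pvRunA l 0 = (0, List.replicate 32 (-1 : Int), 0) := by
        simp [pvRunA]
      rw [h0]
      refine ⟨rfl, by omega, by simp, ?_, le_refl _, ?_, Or.inl rfl⟩
      · intro x hx
        have hget : (List.replicate 32 (-1 : Int)).getD x 0 = -1 := by
          interval_cases x <;> rfl
        show (List.replicate 32 (-1 : Int)).getD x 0 = pvFoD pvAbit l x 0
        rw [hget]
        unfold pvFoD pvFo
        by_cases hz : x = 0
        · subst hz; simp [List.range_one, List.find?_cons, pvPfx]
        · simp [List.range_one, List.find?_cons, pvPfx, Ne.symm hz]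
      · intro t k h1 h2 h3
        have ht : t = 0 := by omega
        have hk : k = 0 := by omega
        subst ht; subst hk
        simp
  | succ n ih =>
      intro hlen
      have hn : n ≤ l.length := by omega
      have : pvRunA l (n + 1) = pvStepA l (pvRunA l n) n := by
        unfold pvRunA
        rw [List.range_succ, List.foldl_append]
        simp
      rw [this]
      exact pvStepA_inv l n (pvRunA l n) (by omega) (ih hn)

-- pointwise agreement of the two bit functions on Pre_ ∖ D_
theorem pvCharEqIff (c d : Char) : c = d ↔ c.toNat = d.toNat := by
  constructor
  · rintro rfl; rfl
  · intro h
    exact Char.ext (by exact UInt32.toNat_inj.mp h)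

theorem pvVbit_toNat (c : Char) : pvVbit c =
    (if c.toNat = 97 then 1 else if c.toNat = 101 then 2 else if c.toNat = 105 then 4
     else if c.toNat = 111 then 8 else if c.toNat = 117 then 16 else 0) := by
  have e1 : (c = 'a') ↔ (c.toNat = 97) := pvCharEqIff c 'a'
  have e2 : (c = 'e') ↔ (c.toNat = 101) := pvCharEqIff c 'e'
  have e3 : (c = 'i') ↔ (c.toNat = 105) := pvCharEqIff c 'i'
  have e4 : (c = 'o') ↔ (c.toNat = 111) := pvCharEqIff c 'o'
  have e5 : (c = 'u') ↔ (c.toNat = 117) := pvCharEqIff c 'u'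
  unfold pvVbit
  simp only [e1, e2, e3, e4, e5]

theorem pvBit_agree (c : Char) (h1 : 71 ≤ c.toNat) (h2 : c.toNat ≤ 122)
    (h3 : c ∉ (['G', 'K', 'O', 'U', '['] : List Char)) : pvAbit c = pvVbit c := by
  have key : ∀ n : Nat, n < 123 → ((71 ≤ n ∧ n ≠ 71 ∧ n ≠ 75 ∧ n ≠ 79 ∧ n ≠ 85 ∧ n ≠ 91) →
      ((PySem.List.pyGet? pvCharMap ((n : Int) - 97)).getD 0).toNat =
        (if n = 97 then 1 else if n = 101 then 2 else if n = 105 then 4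
         else if n = 111 then 8 else if n = 117 then 16 else 0)) := by decide
  have hne : c.toNat ≠ 71 ∧ c.toNat ≠ 75 ∧ c.toNat ≠ 79 ∧ c.toNat ≠ 85 ∧ c.toNat ≠ 91 := by
    refine ⟨?_, ?_, ?_, ?_, ?_⟩ <;>
      [skip; skip; skip; skip; skip] <;>
      intro hh <;>
      exact h3 (by
        have : c = 'G' ∨ c = 'K' ∨ c = 'O' ∨ c = 'U' ∨ c = '[' := by
          first
          | exact Or.inl ((pvCharEqIff c 'G').mpr hh)
          | exact Or.inr (Or.inl ((pvCharEqIff c 'K').mpr hh))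
          | exact Or.inr (Or.inr (Or.inl ((pvCharEqIff c 'O').mpr hh)))
          | exact Or.inr (Or.inr (Or.inr (Or.inl ((pvCharEqIff c 'U').mpr hh))))
          | exact Or.inr (Or.inr (Or.inr (Or.inr ((pvCharEqIff c '[').mpr hh))))
        rcases this with h | h | h | h | h <;> simp [h])
  rw [pvVbit_toNat]
  exact key c.toNat (by omega) ⟨h1, hne.1, hne.2.1, hne.2.2.1, hne.2.2.2.1, hne.2.2.2.2⟩

theorem pvPfx_congr (l : List Char) (h : ∀ c ∈ l, pvAbit c = pvVbit c) (k : Nat) :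
    pvPfx pvAbit l k = pvPfx pvVbit l k := by
  unfold pvPfx
  apply PySem.List.foldl_congr_mem
  intro acc c hc
  rw [h c (List.take_subset k l hc)]

-- ===== B-side characterisation =====
theorem pvVbit_lt (c : Char) : pvVbit c < 32 := by
  unfold pvVbit; split_ifs <;> omega

theorem pvPfx_lt (f : Char → Nat) (hf : ∀ c, f c < 32) (l : List Char) (k : Nat) :
    pvPfx f l k < 32 := by
  induction k with
  | zero => rw [pvPfx_zero]; omega
  | succ k ih =>
      by_cases h : k < l.length
      · rw [pvPfx_succ _ _ _ h]; exact pvXor_lt ih (hf _)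
      · have he : pvPfx f l (k + 1) = pvPfx f l k := by
          unfold pvPfx
          rw [List.take_of_length_le (by omega), List.take_of_length_le (by omega)]
        rw [he]; exact ih

theorem pvPfx_append_le (f : Char → Nat) (l l2 : List Char) (k : Nat) (h : k ≤ l.length) :
    pvPfx f (l ++ l2) k = pvPfx f l k := by
  unfold pvPfx
  rw [List.take_append_of_le_length h]

theorem pvPrefList_eq (l : List Char) :
    pvPrefList l = (List.range (l.length + 1)).map (pvPfx pvVbit l) := by
  induction l using List.reverseRecOn with
  | nil => rfl
  | append_singleton l c ih =>
      unfold pvPrefList at ih ⊢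
      rw [List.foldl_append, List.foldl_cons, List.foldl_nil, ih]
      have hsplit : (List.range (l.length + 1)).map (pvPfx pvVbit l) =
          (List.range l.length).map (pvPfx pvVbit l) ++ [pvPfx pvVbit l l.length] := by
        rw [List.range_succ, List.map_append, List.map_singleton]
      have hlast : PySem.List.pyGetD ((List.range (l.length + 1)).map (pvPfx pvVbit l)) (-1) 0 =
          pvPfx pvVbit l l.length := by
        rw [hsplit]
        exact PySem.List.pyGetD_neg_one_append_singleton _ _ _
      rw [hlast]
      have hlen : (l ++ [c]).length + 1 = (l.length + 1) + 1 := by simp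
      rw [hlen, List.range_succ (n := l.length + 1), List.map_append, List.map_singleton]
      congr 1
      · apply List.map_congr_left
        intro k hk
        rw [pvPfx_append_le _ _ _ _ (by simpa using Nat.le_of_lt_succ (List.mem_range.mp hk))]
      · have hc : (l ++ [c]).getD l.length ' ' = c := by
          simp [List.getD]
        rw [pvPfx_succ pvVbit (l ++ [c]) l.length (by simp), hc,
            pvPfx_append_le _ _ _ _ (le_refl _)]

-- first index t < k with pvPfx f l t = m (pvFo with an arbitrary, possibly 0, bound)
def pvFirstIdx (f : Char → Nat) (l : List Char) (m k : Nat) : Option Nat :=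
  (List.range k).find? (fun t => pvPfx f l t == m)

theorem pvFirstIdx_eq_pvFo (f : Char → Nat) (l : List Char) (m i : Nat) :
    pvFirstIdx f l m (i + 1) = pvFo f l m i := rfl

theorem pvFirstIdx_succ (f : Char → Nat) (l : List Char) (m k : Nat) :
    pvFirstIdx f l m (k + 1) =
      (pvFirstIdx f l m k).or (if pvPfx f l k = m then some k else none) := by
  unfold pvFirstIdx
  rw [List.range_succ, List.find?_append]
  congr 1
  by_cases h : pvPfx f l k = m <;> simp [h]

-- last index t < k with pvPfx f l t = m
def pvLastIdx (f : Char → Nat) (l : List Char) (m k : Nat) : Option Nat :=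
  (List.range k).reverse.find? (fun t => pvPfx f l t == m)

theorem pvRangeRev_succ (k : Nat) : (List.range (k + 1)).reverse = k :: (List.range k).reverse := by
  rw [List.range_succ, List.reverse_append]
  rfl

theorem pvLastIdx_succ (f : Char → Nat) (l : List Char) (m k : Nat) :
    pvLastIdx f l m (k + 1) =
      if pvPfx f l k = m then some k else pvLastIdx f l m k := by
  unfold pvLastIdx
  rw [pvRangeRev_succ]
  by_cases h : pvPfx f l k = m <;> simp [h]

theorem pvLastIdx_some (f : Char → Nat) (l : List Char) (m : Nat) :
    ∀ k t, pvLastIdx f l m k = some t →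
      t < k ∧ pvPfx f l t = m ∧ ∀ u, u < k → pvPfx f l u = m → u ≤ t := by
  intro k
  induction k with
  | zero => intro t h; simp [pvLastIdx] at h
  | succ k ih =>
      intro t h
      rw [pvLastIdx_succ] at h
      by_cases hc : pvPfx f l k = m
      · rw [if_pos hc] at h
        obtain rfl : k = t := Option.some.inj h
        exact ⟨by omega, hc, fun u hu _ => by omega⟩
      · rw [if_neg hc] at h
        obtain ⟨h1, h2, h3⟩ := ih t h
        refine ⟨by omega, h2, ?_⟩
        intro u hu hum
        rcases Nat.lt_or_ge u k with h' | h'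
        · exact h3 u h' hum
        · have : u = k := by omega
          subst this
          exact absurd hum hc

theorem pvLastIdx_none (f : Char → Nat) (l : List Char) (m : Nat) :
    ∀ k, pvLastIdx f l m k = none → ∀ t, t < k → pvPfx f l t ≠ m := by
  intro k
  induction k with
  | zero => intro _ t ht; omega
  | succ k ih =>
      intro h t ht
      rw [pvLastIdx_succ] at h
      by_cases hc : pvPfx f l k = m
      · rw [if_pos hc] at h; exact absurd h (by simp)
      · rw [if_neg hc] at h
        rcases Nat.lt_or_ge t k with h' | h'
        · exact ih h t h'
        · have : t = k := by omega
          subst this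
          exact hc

theorem pvLastIdx_exists (f : Char → Nat) (l : List Char) (m k t : Nat)
    (ht : t < k) (hm : pvPfx f l t = m) : ∃ u, pvLastIdx f l m k = some u := by
  cases h : pvLastIdx f l m k with
  | none => exact absurd hm (pvLastIdx_none f l m k h t ht)
  | some u => exact ⟨u, rfl⟩

theorem pvRepl32 (m : Nat) (hm : m < 32) : (List.replicate 32 (-1 : Int)).getD m 0 = -1 := by
  interval_cases m <;> rfl

theorem pvFill_length (g : Nat → Nat) :
    ∀ (ts : List Nat) (arr : List Int),
      (ts.foldl (fun arr t => arr.set (g t) (t : Int)) arr).length = arr.length := by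
  intro ts
  induction ts with
  | nil => intro arr; rfl
  | cons t ts ih => intro arr; rw [List.foldl_cons, ih]; simp

theorem pvFillDown_getD (f : Char → Nat) (l : List Char) (hf : ∀ c, f c < 32) :
    ∀ (k : Nat) (arr0 : List Int), arr0.length = 32 → ∀ m, m < 32 →
      ((List.range k).reverse.foldl
        (fun arr t => arr.set (pvPfx f l t) (t : Int)) arr0).getD m 0 =
        (match pvFirstIdx f l m k with | some t => (t : Int) | none => arr0.getD m 0) := by
  intro k
  induction k with
  | zero => intro arr0 _ m _; rfl
  | succ k ih =>
      intro arr0 hlen m hm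
      rw [pvRangeRev_succ, List.foldl_cons]
      have hset : (arr0.set (pvPfx f l k) (k : Int)).length = 32 := by simp [hlen]
      rw [ih (arr0.set (pvPfx f l k) (k : Int)) hset m hm, pvFirstIdx_succ]
      cases hfo : pvFirstIdx f l m k with
      | some t => rfl
      | none =>
          by_cases hc : pvPfx f l k = m
          · rw [if_pos hc]
            subst hc
            have hk : pvPfx f l k < arr0.length := by rw [hlen]; exact pvPfx_lt f hf l k
            simp [List.getD, List.getElem?_set_self, hk]
          · rw [if_neg hc]
            simp [List.getD, List.getElem?_set_ne (fun hh => hc hh)]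

theorem pvFillUp_getD (f : Char → Nat) (l : List Char) (hf : ∀ c, f c < 32) :
    ∀ (k : Nat) (arr0 : List Int), arr0.length = 32 → ∀ m, m < 32 →
      ((List.range k).foldl
        (fun arr t => arr.set (pvPfx f l t) (t : Int)) arr0).getD m 0 =
        (match pvLastIdx f l m k with | some t => (t : Int) | none => arr0.getD m 0) := by
  intro k
  induction k with
  | zero => intro arr0 _ m _; rfl
  | succ k ih =>
      intro arr0 hlen m hm
      rw [List.range_succ, List.foldl_append, List.foldl_cons, List.foldl_nil, pvLastIdx_succ]
      have hlenk : ((List.range k).foldl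
          (fun arr t => arr.set (pvPfx f l t) (t : Int)) arr0).length = 32 := by
        rw [pvFill_length]; exact hlen
      by_cases hc : pvPfx f l k = m
      · rw [if_pos hc]
        subst hc
        have hk : pvPfx f l k < ((List.range k).foldl
            (fun arr t => arr.set (pvPfx f l t) (t : Int)) arr0).length := by
          rw [hlenk]; exact pvPfx_lt f hf l k
        simp [List.getD, List.getElem?_set_self, hk]
      · rw [if_neg hc]
        rw [show ((((List.range k).foldl (fun arr t => arr.set (pvPfx f l t) (t : Int)) arr0).set
            (pvPfx f l k) (k : Int)).getD m 0) =
            (((List.range k).foldl (fun arr t => arr.set (pvPfx f l t) (t : Int)) arr0).getD m 0)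
          from by simp [List.getD, List.getElem?_set_ne (fun hh => hc hh)]]
        exact ih arr0 hlen m hm

-- B's value on a char list
def pvRunB (l : List Char) : Int :=
  let pref := pvPrefList l
  let first := pvFillDown pref
  let last := pvFillUp pref
  (PySem.List.max? ((List.range 32).filterMap
      (fun m => if 0 ≤ first.getD m 0 then some (last.getD m 0 - first.getD m 0) else none))
    (fun x => x)).getD 0

theorem pvRunB_spec (l : List Char) :
    0 ≤ pvRunB l ∧
    (∀ t k : Nat, t ≤ k → k ≤ l.length → pvPfx pvVbit l t = pvPfx pvVbit l k →
      (k : Int) - t ≤ pvRunB l) ∧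
    (∃ t k : Nat, t ≤ k ∧ k ≤ l.length ∧ pvPfx pvVbit l t = pvPfx pvVbit l k ∧
      pvRunB l = (k : Int) - t) := by
  set n := l.length with hn
  have hpl : (pvPrefList l).length = n + 1 := by rw [pvPrefList_eq]; simp [hn]
  have hgetpref : ∀ t, t < n + 1 → (pvPrefList l).getD t 0 = pvPfx pvVbit l t := by
    intro t ht
    have ht' : t < l.length + 1 := by omega
    rw [pvPrefList_eq]
    simp [List.getD, List.getElem?_map, List.getElem?_range, ht']
  -- rewrite the two fills to folds over the pure prefix function
  have hfirst : ∀ m, m < 32 → (pvFillDown (pvPrefList l)).getD m 0 =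
      (match pvFirstIdx pvVbit l m (n + 1) with | some t => (t : Int) | none => -1) := by
    intro m hm
    unfold pvFillDown
    rw [hpl]
    have hfoldeq : (List.range (n + 1)).reverse.foldl
        (fun (arr : List Int) t => arr.set ((pvPrefList l).getD t 0) (t : Int))
        (List.replicate 32 (-1 : Int)) =
        (List.range (n + 1)).reverse.foldl
        (fun (arr : List Int) t => arr.set (pvPfx pvVbit l t) (t : Int))
        (List.replicate 32 (-1 : Int)) := by
      apply PySem.List.foldl_congr_mem
      intro arr t htm
      rw [hgetpref t (List.mem_range.mp (List.mem_reverse.mp htm))]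
    rw [hfoldeq]
    rw [pvFillDown_getD pvVbit l pvVbit_lt (n + 1) _ (by simp) m hm]
    cases pvFirstIdx pvVbit l m (n + 1) with
    | some t => rfl
    | none => rw [pvRepl32 m hm]
  have hlastg : ∀ m, m < 32 → (pvFillUp (pvPrefList l)).getD m 0 =
      (match pvLastIdx pvVbit l m (n + 1) with | some t => (t : Int) | none => -1) := by
    intro m hm
    unfold pvFillUp
    rw [hpl]
    have hfoldeq : (List.range (n + 1)).foldl
        (fun (arr : List Int) t => arr.set ((pvPrefList l).getD t 0) (t : Int))
        (List.replicate 32 (-1 : Int)) =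
        (List.range (n + 1)).foldl
        (fun (arr : List Int) t => arr.set (pvPfx pvVbit l t) (t : Int))
        (List.replicate 32 (-1 : Int)) := by
      apply PySem.List.foldl_congr_mem
      intro arr t htm
      rw [hgetpref t (List.mem_range.mp htm)]
    rw [hfoldeq]
    rw [pvFillUp_getD pvVbit l pvVbit_lt (n + 1) _ (by simp) m hm]
    cases pvLastIdx pvVbit l m (n + 1) with
    | some t => rfl
    | none => rw [pvRepl32 m hm]
  set cands := (List.range 32).filterMap
      (fun m => if 0 ≤ (pvFillDown (pvPrefList l)).getD m 0
        then some ((pvFillUp (pvPrefList l)).getD m 0 - (pvFillDown (pvPrefList l)).getD m 0)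
        else none) with hcands
  have hrB : pvRunB l = (PySem.List.max? cands (fun x => x)).getD 0 := rfl
  -- for every occurring mask, its candidate is in the list
  have hcand : ∀ t k : Nat, t ≤ k → k ≤ n → pvPfx pvVbit l t = pvPfx pvVbit l k →
      ∃ t1 t2 : Nat, t1 ≤ t ∧ k ≤ t2 ∧ t2 ≤ n ∧
        pvPfx pvVbit l t1 = pvPfx pvVbit l t ∧ pvPfx pvVbit l t2 = pvPfx pvVbit l t ∧
        ((t2 : Int) - t1) ∈ cands := by
    intro t k htk hk hp
    set m := pvPfx pvVbit l t with hm
    have hm32 : m < 32 := pvPfx_lt pvVbit pvVbit_lt l t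
    obtain ⟨t1, ht1⟩ := pvFo_exists pvVbit l m n t (by omega) hm.symm
    obtain ⟨ht1n, ht1m, ht1min⟩ := pvFo_some pvVbit l m n t1 ht1
    obtain ⟨t2, ht2⟩ := pvLastIdx_exists pvVbit l m (n + 1) k (by omega) (by rw [← hp])
    obtain ⟨ht2n, ht2m, ht2max⟩ := pvLastIdx_some pvVbit l m (n + 1) t2 ht2
    refine ⟨t1, t2, ht1min t (by omega) hm.symm, ht2max k (by omega) (by rw [← hp]),
      by omega, by rw [ht1m], by rw [ht2m], ?_⟩
    rw [hcands]
    apply List.mem_filterMap.mpr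
    refine ⟨m, List.mem_range.mpr hm32, ?_⟩
    rw [hfirst m hm32, hlastg m hm32, ht2]
    rw [show pvFirstIdx pvVbit l m (n + 1) = some t1 from ht1]
    rw [if_pos (by positivity)]
  -- the max exists
  obtain ⟨t1, t2, h11, h12, h13, h14, h15, hmem⟩ :=
    hcand 0 0 (le_refl 0) (Nat.zero_le n) rfl
  obtain ⟨r, hr⟩ : ∃ r, PySem.List.max? cands (fun x => x) = some r := by
    cases h : PySem.List.max? cands (fun x => x) with
    | none =>
        rw [PySem.List.max?_eq_none_iff] at h
        rw [h] at hmem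
        exact absurd hmem (List.not_mem_nil)
    | some r => exact ⟨r, rfl⟩
  have hrval : pvRunB l = r := by rw [hrB, hr]; rfl
  have hmax : ∀ y ∈ cands, y ≤ r := by
    intro y hy
    exact PySem.List.max?_isMax hr y hy
  constructor
  · -- 0 ≤ r via the mask-of-prefix-0 candidate
    rw [hrval]
    have := hmax _ hmem
    omega
  constructor
  · -- lower bound for every even pair
    intro t k htk hk hp
    obtain ⟨u1, u2, hu1, hu2, hu3, _, _, humem⟩ := hcand t k htk hk hp
    have := hmax _ humem
    rw [hrval]
    omega
  · -- achievability: r is some candidate, which is an even pair value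
    have hrmem : r ∈ cands := PySem.List.max?_mem hr
    rw [hcands] at hrmem
    obtain ⟨m, hmr, hsome⟩ := List.mem_filterMap.mp hrmem
    have hm32 : m < 32 := List.mem_range.mp hmr
    rw [hfirst m hm32, hlastg m hm32] at hsome
    cases hfo : pvFirstIdx pvVbit l m (n + 1) with
    | none => rw [hfo] at hsome; simp at hsome
    | some t1 =>
        rw [hfo] at hsome
        rw [pvFirstIdx_eq_pvFo] at hfo
        obtain ⟨ht1n, ht1m, -⟩ := pvFo_some pvVbit l m n t1 hfo
        obtain ⟨t2, ht2⟩ := pvLastIdx_exists pvVbit l m (n + 1) t1 (by omega) ht1m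
        obtain ⟨ht2n, ht2m, ht2max⟩ := pvLastIdx_some pvVbit l m (n + 1) t2 ht2
        rw [ht2] at hsome
        rw [if_pos (by positivity)] at hsome
        have hval : r = (t2 : Int) - t1 := (Option.some.inj hsome).symm
        exact ⟨t1, t2, ht2max t1 (by omega) ht1m, by omega,
          by rw [ht1m, ht2m], by rw [hrval, hval]⟩

theorem pvEquiv (l : List Char) (hbits : ∀ c ∈ l, pvAbit c = pvVbit c) :
    (pvRunA l l.length).2.2 = pvRunB l := by
  obtain ⟨-, -, -, -, hA0, hALB, hAACH⟩ := pvRunA_inv l l.length (le_refl _)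
  obtain ⟨hB0, hBLB, hBACH⟩ := pvRunB_spec l
  have hpfx := pvPfx_congr l hbits
  apply le_antisymm
  · rcases hAACH with h | ⟨t, k, htk, hk, hp, hv⟩
    · rw [h]; exact hB0
    · rw [hv]
      exact hBLB t k htk hk (by rw [← hpfx, ← hpfx]; exact hp)
  · obtain ⟨t, k, htk, hk, hp, hv⟩ := hBACH
    rw [hv]
    exact hALB t k htk hk (by rw [hpfx, hpfx]; exact hp)

-- ===== VERDICT =====
theorem findTheLongestSubstring_spec : Claim_equal_findTheLongestSubstring := by
  intro s _ hpre
  unfold Spec_findTheLongestSubstring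
  unfold Pre_findTheLongestSubstring at hpre
  rw [List.all_eq_true] at hpre
  have hbits : ∀ c ∈ s.toList, pvAbit c = pvVbit c := by
    intro c hc
    have h := hpre c hc
    simp only [Bool.and_eq_true, Bool.not_eq_eq_eq_not, Bool.not_true, decide_eq_true_eq,
      decide_eq_false_iff_not] at h
    exact pvBit_agree c h.1.1 h.1.2 h.2
  exact pvEquiv s.toList hbits
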